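-- pv_equiv track=rewrite | github.com/ltrujello/Finite_Abelian_Groups | finite_abelian_groups.py | produce_factors
-- ===== SOURCE A (Python) =====
-- from itertools import product
--
-- def produce_factors(all_factors):
--     "The input is the list of lists containing primes to their power, while"
--     "the output is the set of all factorizations of the desired integer."
--     final_list = []
--     sorted_prods = []
--     K = list(all_factors) #forces it to be of type list
--     products = list(product(*K)) #takes the cartesian product
--     for prod in products: #rest of code just neatly organizes the products
--         final_list = []
--         for elem in prod:
--             final_list += elem
--         sorted_prods += [final_list]
--     return sorted_prods
-- ===== SOURCE B (Python) =====
-- def produce_factors(all_factors):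
--     "The input is the list of lists containing primes to their power, while"
--     "the output is the set of all factorizations of the desired integer."
--     combos = [[]]
--     for factor_list in list(all_factors):
--         combos = [acc + elem for acc in combos for elem in factor_list]
--     return combos
-- ===== Notes on version B (the rewrite author's own statement) =====
-- stated objective: idiomatic
-- what changed: Replaces itertools.product plus a separate flattening loop over each tuple by a single running accumulator of partial flattened factorizations, rebuilt once per factor list with a comprehension.
import Mathlib
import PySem

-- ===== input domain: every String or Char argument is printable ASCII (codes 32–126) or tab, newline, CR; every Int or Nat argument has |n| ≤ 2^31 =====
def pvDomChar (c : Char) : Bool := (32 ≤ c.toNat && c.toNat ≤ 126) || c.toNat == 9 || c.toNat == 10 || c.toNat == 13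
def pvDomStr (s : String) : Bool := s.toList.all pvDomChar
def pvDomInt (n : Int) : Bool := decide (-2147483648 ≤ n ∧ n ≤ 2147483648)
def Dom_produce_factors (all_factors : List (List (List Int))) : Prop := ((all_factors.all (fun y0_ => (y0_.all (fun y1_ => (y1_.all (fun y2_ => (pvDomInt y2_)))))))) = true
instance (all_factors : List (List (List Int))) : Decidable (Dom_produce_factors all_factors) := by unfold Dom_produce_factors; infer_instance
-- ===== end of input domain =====

-- B replaces itertools.product + per-tuple flattening by one running accumulator of partial flattened rows (idiomatic; same cost).

-- ===== PORT A =====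
-- itertools.product(*K), in itertools order (last factor varies fastest)
def pyProduct (K : List (List (List Int))) : List (List (List Int)) :=
  match K with
  | [] => [[]]
  | k :: rest => k.flatMap (fun x => (pyProduct rest).map (fun p => x :: p))

def produce_factors (all_factors : List (List (List Int))) : List (List Int) :=
  (pyProduct all_factors).foldl
    (fun sorted_prods prod =>
      sorted_prods ++ [prod.foldl (fun final_list elem => final_list ++ elem) []])
    []

-- ===== PORT B =====
def produce_factors_alt (all_factors : List (List (List Int))) : List (List Int) :=
  all_factors.foldl
    (fun combos factor_list => combos.flatMap (fun acc => factor_list.map (fun elem => acc ++ elem)))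
    [[]]

-- ===== PRECONDITION & SPEC =====
def Spec_produce_factors (all_factors : List (List (List Int))) (out : List (List Int)) : Prop := out = produce_factors_alt all_factors
instance (all_factors : List (List (List Int))) (out : List (List Int)) : Decidable (Spec_produce_factors all_factors out) := by unfold Spec_produce_factors; infer_instance

-- ===== CLAIM (what is proved, stated in full; the proofs are below) =====
def Claim_equal_produce_factors : Prop := ∀ (all_factors : List (List (List Int))), Dom_produce_factors all_factors → Spec_produce_factors all_factors (produce_factors all_factors)

-- ===== LEMMAS AND PROOFS =====

-- foldl (++) s p = s ++ p.flatten
theorem pv_foldl_append (p : List (List Int)) : ∀ (s : List Int),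
    p.foldl (fun fl e => fl ++ e) s = s ++ p.flatten := by
  induction p with
  | nil => simp
  | cons x xs ih => intro s; simp [List.foldl_cons, ih]

-- A's outer loop is a map over the products
theorem pv_A_map (ps : List (List (List Int))) : ∀ (s : List (List Int)),
    ps.foldl (fun sp prod => sp ++ [prod.foldl (fun fl e => fl ++ e) []]) s
      = s ++ ps.map (fun p => p.flatten) := by
  induction ps with
  | nil => simp
  | cons x xs ih =>
    intro s
    rw [List.foldl_cons, ih, pv_foldl_append]
    simp

-- distributing one factor list over common prefix a
theorem pv_step (a : List Int) (P : List (List (List Int))) (k : List (List Int)) :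
    (k.map (fun x => a ++ x)).flatMap (fun a2 => P.map (fun p => a2 ++ p.flatten))
      = (k.flatMap (fun x => P.map (fun p => x :: p))).map (fun p => a ++ p.flatten) := by
  induction k with
  | nil => simp
  | cons x xs ih =>
    simp only [List.map_cons, List.flatMap_cons, List.map_append, ih, List.map_map]
    congr 1
    apply List.map_congr_left
    intro p _
    simp [Function.comp, List.append_assoc]

-- B's loop computes acc ⋈ flattened products
theorem pv_B_fold (af : List (List (List Int))) : ∀ (acc : List (List Int)),
    af.foldl (fun combos fl => combos.flatMap (fun a => fl.map (fun e => a ++ e))) acc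
      = acc.flatMap (fun a => (pyProduct af).map (fun p => a ++ p.flatten)) := by
  induction af with
  | nil => simp [pyProduct]
  | cons k rest ih =>
    intro acc
    rw [List.foldl_cons, ih]
    show (acc.flatMap (fun a => k.map (fun e => a ++ e))).flatMap _ = _
    induction acc with
    | nil => simp
    | cons a acc iha =>
      simp only [List.flatMap_cons, List.flatMap_append, iha, pyProduct]
      congr 1
      exact pv_step a (pyProduct rest) k

-- ===== VERDICT (by name: the statement is the Claim_ definition above) =====
theorem produce_factors_spec : Claim_equal_produce_factors := by
  intro af _
  unfold Spec_produce_factors produce_factors produce_factors_alt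
  rw [pv_A_map, pv_B_fold]
  simp
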